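-- pv_equiv track=rewrite | github.com/Thyrisis/r-demos | advent-of-code-2025/day3.py | get_n_sequential_peaks
-- ===== SOURCE A (Python) =====
-- def get_n_sequential_peaks(input_string, n_peaks):
--
--     results = []
--     current_start = 0
--     total_len = len(input_string)
--
--     for i in range(n_peaks):
--         # Calculate how many more peaks we need after this one
--         remaining_needed = n_peaks - (i + 1)
--
--         # The search must end early enough to leave 'remaining_needed' characters
--         search_end = total_len - remaining_needed
--
--         if current_start >= search_end:
--             break
--
--         # Slice the string for the valid search range
--         search_range = input_string[current_start:search_end]
--
--         if not search_range:
--             break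
--
--         # Find the max in the range but keep idx relative to the original string
--         pos, val = max(enumerate(search_range, start=current_start), key=lambda x: x[1])
--
--         results.append(val)
--
--         # Next search starts immediately after the current peak's position
--         current_start = pos + 1
--
--     return results
-- ===== SOURCE B (Python) =====
-- def get_n_sequential_peaks(input_string, n_peaks):
--     # Single-pass monotonic-stack selection of the lexicographically greatest
--     # subsequence of length n_peaks (earliest positions on ties).
--     n = len(input_string)
--     if n_peaks > n:
--         return []
--     stack = []
--     for i, c in enumerate(input_string):
--         while stack and stack[-1] < c and len(stack) + (n - i) > n_peaks:
--             stack.pop()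
--         if len(stack) < n_peaks:
--             stack.append(c)
--     return stack
-- ===== Notes on version B (the rewrite author's own statement) =====
-- stated objective: faster
-- what changed: A repeatedly scans a shrinking window with max() once per requested peak (O(n_peaks*len)); B makes a single left-to-right pass with a monotonic decreasing stack that pops a smaller tentative peak only while enough characters remain, yielding the same greedy (earliest-on-ties) sequence in O(len).
import Mathlib
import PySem

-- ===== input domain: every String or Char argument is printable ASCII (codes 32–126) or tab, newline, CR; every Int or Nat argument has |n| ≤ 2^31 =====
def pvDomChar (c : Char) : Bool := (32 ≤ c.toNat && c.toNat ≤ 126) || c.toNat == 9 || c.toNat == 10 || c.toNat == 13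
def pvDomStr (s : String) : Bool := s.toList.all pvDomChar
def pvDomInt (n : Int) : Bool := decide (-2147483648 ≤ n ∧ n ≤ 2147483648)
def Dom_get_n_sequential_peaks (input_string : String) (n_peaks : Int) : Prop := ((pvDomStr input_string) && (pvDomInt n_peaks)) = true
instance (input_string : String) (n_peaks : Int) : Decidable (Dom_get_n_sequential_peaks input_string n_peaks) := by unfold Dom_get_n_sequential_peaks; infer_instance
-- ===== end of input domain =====

-- B replaces A's per-peak window rescans by one monotonic-stack pass; measured objective: faster (asymptotic).

-- ===== PORT A =====
-- A's for-loop as structural recursion on the remaining iteration count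
-- (fuel = n_peaks - i, so remaining_needed at the current iteration is fuel - 1);
-- each `break`/loop-end returns the (empty) tail of the results list.
def pvALoop (s : List Char) (total_len : Int) (current_start : Int) : Nat → List String
  | 0 => []
  | fuel+1 =>
    let search_end := total_len - (fuel : Int)
    if current_start ≥ search_end then []
    else
      let search_range := PySem.List.slice s (some current_start) (some search_end)
      if search_range = [] then []
      else
        match PySem.List.max? (PySem.List.enumerate search_range current_start) (fun x => x.2) with
        | none => []
        | some pv => String.ofList [pv.2] :: pvALoop s total_len (pv.1 + 1) fuel

def get_n_sequential_peaks (input_string : String) (n_peaks : Int) : List String :=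
  pvALoop input_string.toList (input_string.toList.length : Int) 0 n_peaks.toNat

-- ===== PORT B =====
-- `while stack and stack[-1] < c and len(stack) + (n - i) > n_peaks: stack.pop()`
-- (stack kept top-at-head; rem = n - i = number of unprocessed chars including c)
def pvPop (k : Nat) (rem : Nat) (c : Char) : List Char → List Char
  | [] => []
  | t :: st => if t < c ∧ (st.length + 1) + rem > k then pvPop k rem c st else t :: st

-- the `for i, c in enumerate(input_string)` loop
def pvGo (k : Nat) (st : List Char) : List Char → List Char
  | [] => st
  | c :: rest =>
      let st' := pvPop k (rest.length + 1) c st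
      pvGo k (if st'.length < k then c :: st' else st') rest

def get_n_sequential_peaks_alt (input_string : String) (n_peaks : Int) : List String :=
  let s := input_string.toList
  if n_peaks > (s.length : Int) then []
  else (pvGo n_peaks.toNat [] s).reverse.map (fun c => String.ofList [c])

-- ===== PRECONDITION & SPEC =====
def Spec_get_n_sequential_peaks (input_string : String) (n_peaks : Int) (out : List String) : Prop := out = get_n_sequential_peaks_alt input_string n_peaks
instance (input_string : String) (n_peaks : Int) (out : List String) : Decidable (Spec_get_n_sequential_peaks input_string n_peaks out) := by unfold Spec_get_n_sequential_peaks; infer_instance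

-- ===== CLAIM (what is proved, stated in full; the proofs are below) =====
def Claim_equal_get_n_sequential_peaks : Prop := ∀ (input_string : String) (n_peaks : Int), Dom_get_n_sequential_peaks input_string n_peaks → Spec_get_n_sequential_peaks input_string n_peaks (get_n_sequential_peaks input_string n_peaks)

-- ===== LEMMAS AND PROOFS =====

-- first argmax (index of the first maximal char) of a list, built from the front
def pvFam : List Char → Option (Nat × Char)
  | [] => none
  | c :: rest => match pvFam rest with
      | none => some (0, c)
      | some (p, m) => if c < m then some (p+1, m) else some (0, c)

theorem pvMax?_cons_cons (q x : Int × Char) (l : List (Int × Char)) :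
    PySem.List.max? (q :: x :: l) (fun y => y.2)
      = PySem.List.max? ((if q.2 < x.2 then x else q) :: l) (fun y => y.2) := by
  unfold PySem.List.max?
  simp only [List.foldl_cons]
  rw [← apply_ite some (q.2 < x.2) x q]

theorem pvFam_acc (w : List Char) : ∀ (a : Int) (q : Int × Char),
    PySem.List.max? (q :: PySem.List.enumerate w a) (fun y => y.2)
    = match pvFam w with
      | none => some q
      | some pm => if q.2 < pm.2 then some ((a + (pm.1 : Int), pm.2)) else some q := by
  induction w with
  | nil =>
    intro a q
    simp [pvFam, PySem.List.enumerate, PySem.List.max?]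
  | cons c rest ih =>
    intro a q
    rw [PySem.List.enumerate_cons, pvMax?_cons_cons q (a, c)]
    dsimp only
    rw [ih (a+1) (if q.2 < c then (a, c) else q)]
    simp only [pvFam]
    cases hr : pvFam rest with
    | none =>
      dsimp only
      by_cases hqc : q.2 < c <;> simp [hqc]
    | some pm =>
      obtain ⟨p', m'⟩ := pm
      dsimp only
      by_cases hcm : c < m'
      · rw [if_pos hcm]
        by_cases hqc : q.2 < c
        · rw [if_pos hqc]
          dsimp only
          rw [if_pos hcm, if_pos (lt_trans hqc hcm)]
          congr 1
          push_cast
          ring_nf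
        · rw [if_neg hqc]
          dsimp only
          by_cases hqm : q.2 < m' <;> simp [hqm]
          ring_nf
      · rw [if_neg hcm]
        by_cases hqc : q.2 < c
        · rw [if_pos hqc]
          dsimp only
          rw [if_neg hcm, if_pos hqc]
          simp
        · rw [if_neg hqc]
          dsimp only
          rw [if_neg (fun hqm => hqc (lt_of_lt_of_le hqm (not_lt.mp hcm))), if_neg hqc]

theorem pvMax?_enum (w : List Char) (a : Int) (p : Nat) (m : Char) (h : pvFam w = some (p, m)) :
    PySem.List.max? (PySem.List.enumerate w a) (fun x => x.2) = some ((a + (p : Int)), m) := by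
  cases w with
  | nil => simp [pvFam] at h
  | cons c rest =>
    rw [PySem.List.enumerate_cons, pvFam_acc rest (a+1) (a, c)]
    simp only [pvFam] at h
    cases hr : pvFam rest with
    | none =>
      rw [hr] at h
      obtain ⟨hp, hm⟩ : 0 = p ∧ c = m := by simpa using h
      subst hp; subst hm
      simp
    | some pm =>
      obtain ⟨p', m'⟩ := pm
      rw [hr] at h
      dsimp only at h ⊢
      by_cases hcm : c < m'
      · rw [if_pos hcm] at h
        obtain ⟨hp, hm⟩ : p' + 1 = p ∧ m' = m := by simpa using h
        subst hp; subst hm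
        rw [if_pos hcm]
        congr 1
        push_cast
        ring_nf
      · rw [if_neg hcm] at h
        obtain ⟨hp, hm⟩ : 0 = p ∧ c = m := by simpa using h
        subst hp; subst hm
        rw [if_neg hcm]
        simp

theorem pvFam_none (w : List Char) : pvFam w = none ↔ w = [] := by
  cases w with
  | nil => simp [pvFam]
  | cons c rest =>
    simp only [pvFam]
    cases h : pvFam rest with
    | none => simp
    | some pm => simp only []; split <;> simp

theorem pvFam_spec (w : List Char) : ∀ (p : Nat) (m : Char), pvFam w = some (p, m) →
    w[p]? = some m ∧ (∀ (j : Nat) x, j < p → w[j]? = some x → x < m) ∧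
      (∀ (j : Nat) x, w[j]? = some x → x ≤ m) := by
  induction w with
  | nil => intro p m h; simp [pvFam] at h
  | cons c rest ih =>
    intro p m h
    simp only [pvFam] at h
    cases hr : pvFam rest with
    | none =>
      rw [hr] at h
      obtain ⟨hp, hm⟩ : 0 = p ∧ c = m := by simpa using h
      subst hp; subst hm
      have hrest : rest = [] := (pvFam_none rest).mp hr
      subst hrest
      refine ⟨by simp, by omega, ?_⟩
      intro j x hx
      cases j with
      | zero => simp at hx; simp [hx]
      | succ j' => simp at hx
    | some pm =>
      obtain ⟨p', m'⟩ := pm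
      rw [hr] at h
      dsimp only at h
      obtain ⟨h1, h2, h3⟩ := ih p' m' hr
      by_cases hcm : c < m'
      · rw [if_pos hcm] at h
        obtain ⟨hp, hm⟩ : p' + 1 = p ∧ m' = m := by simpa using h
        subst hp; subst hm
        refine ⟨by simpa using h1, ?_, ?_⟩
        · intro j x hj hx
          cases j with
          | zero => simp at hx; subst hx; exact hcm
          | succ j' => exact h2 j' x (by omega) (by simpa using hx)
        · intro j x hx
          cases j with
          | zero => simp at hx; subst hx; exact le_of_lt hcm
          | succ j' => exact h3 j' x (by simpa using hx)
      · rw [if_neg hcm] at h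
        obtain ⟨hp, hm⟩ : 0 = p ∧ c = m := by simpa using h
        subst hp; subst hm
        refine ⟨by simp, by omega, ?_⟩
        intro j x hx
        cases j with
        | zero => simp at hx; simp [hx]
        | succ j' => exact le_trans (h3 j' x (by simpa using hx)) (not_lt.mp hcm)

theorem pvFam_lt_length (w : List Char) (p : Nat) (m : Char) (h : pvFam w = some (p, m)) :
    p < w.length := by
  have := (pvFam_spec w p m h).1
  exact List.getElem?_eq_some_iff.mp this |>.1

theorem pvPop_subset (k rem : Nat) (c : Char) (st : List Char) :
    ∀ x ∈ pvPop k rem c st, x ∈ st := by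
  induction st with
  | nil => simp [pvPop]
  | cons t rest ih =>
    intro x hx
    simp only [pvPop] at hx
    split at hx
    · exact List.mem_cons_of_mem t (ih x hx)
    · exact hx

theorem pvPop_all (st : List Char) (k rem : Nat) (c : Char) (hm : k ≤ rem)
    (h : ∀ x ∈ st, x < c) : pvPop k rem c st = [] := by
  induction st with
  | nil => simp [pvPop]
  | cons t rest ih =>
    simp only [pvPop]
    rw [if_pos ⟨h t (List.mem_cons_self), by omega⟩]
    exact ih (fun x hx => h x (List.mem_cons_of_mem t hx))

theorem pvPop_pin (upper : List Char) (k rem : Nat) (c d : Char) (hk : 1 ≤ k)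
    (hblock : k ≤ rem → d ≤ c) :
    pvPop k rem d (upper ++ [c]) = pvPop (k-1) rem d upper ++ [c] := by
  induction upper with
  | nil =>
    simp only [List.nil_append, pvPop]
    rw [if_neg]
    rintro ⟨h1, h2⟩
    simp only [List.length_nil] at h2
    exact absurd h1 (not_lt.mpr (hblock (by omega)))
  | cons a rest ih =>
    simp only [List.cons_append, pvPop, List.length_append, List.length_cons,
      List.length_nil]
    by_cases had : a < d
    · by_cases hlen : rest.length + 1 + rem > k - 1
      · rw [if_pos ⟨had, by omega⟩, if_pos ⟨had, hlen⟩]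
        exact ih
      · rw [if_neg (by rintro ⟨_, h2⟩; omega), if_neg (by rintro ⟨_, h2⟩; omega)]
        simp
    · rw [if_neg (by rintro ⟨h1, _⟩; exact had h1), if_neg (by rintro ⟨h1, _⟩; exact had h1)]
      rfl

theorem pvGo_pin (t : List Char) : ∀ (k : Nat) (c : Char) (upper : List Char),
    1 ≤ k →
    (∀ j x, k ≤ t.length - j → t[j]? = some x → x ≤ c) →
    pvGo k (upper ++ [c]) t = pvGo (k-1) upper t ++ [c] := by
  induction t with
  | nil => intro k c upper hk h; rfl
  | cons d rest ih =>
    intro k c upper hk h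
    have hb : k ≤ rest.length + 1 → d ≤ c := by
      intro hkr
      exact h 0 d (by simpa using hkr) (by simp)
    simp only [pvGo]
    rw [pvPop_pin upper k (rest.length + 1) c d hk hb]
    set P := pvPop (k-1) (rest.length + 1) d upper with hP
    have h' : ∀ j x, k ≤ rest.length - j → rest[j]? = some x → x ≤ c := by
      intro j x hj hx
      exact h (j+1) x (by simp; omega) (by simpa using hx)
    by_cases hl : P.length < k - 1
    · rw [if_pos (by simp; omega), if_pos hl]
      have := ih k c (d :: P) hk h'
      simpa using this
    · rw [if_neg (by simp; omega), if_neg hl]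
      exact ih k c P hk h' 

theorem pvGo_zero (t : List Char) : pvGo 0 [] t = [] := by
  induction t with
  | nil => rfl
  | cons c rest ih => simpa [pvGo, pvPop] using ih

theorem pvGo_split (t : List Char) : ∀ (k p : Nat) (c : Char) (st : List Char),
    1 ≤ k → k + p ≤ t.length →
    t[p]? = some c →
    (∀ j x, j < p → t[j]? = some x → x < c) →
    (∀ j x, k ≤ t.length - j → t[j]? = some x → x ≤ c) →
    (∀ x ∈ st, x < c) →
    pvGo k st t = pvGo (k-1) [] (t.drop (p+1)) ++ [c] := by
  induction t with
  | nil => intro k p c st hk hkp; exfalso; simp at hkp; omega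
  | cons d rest ih =>
    intro k p c st hk hkp hc h2 h3 hst
    cases p with
    | zero =>
      have hcd : d = c := by simpa using hc
      subst hcd
      simp only [pvGo]
      rw [pvPop_all st k (rest.length + 1) d (by simpa using hkp) hst]
      rw [if_pos (by simpa using hk)]
      have h' : ∀ j x, k ≤ rest.length - j → rest[j]? = some x → x ≤ d := by
        intro j x hj hx
        exact h3 (j+1) x (by simp; omega) (by simpa using hx)
      have := pvGo_pin rest k d [] hk h'
      simpa using this
    | succ q =>
      have hd : d < c := h2 0 d (Nat.succ_pos q) (by simp)
      simp only [pvGo]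
      set st' := pvPop k (rest.length + 1) d st with hst'
      have hsub : ∀ x ∈ st', x < c := fun x hx =>
        hst x (pvPop_subset k (rest.length + 1) d st x hx)
      have hnew : ∀ x ∈ (if st'.length < k then d :: st' else st'), x < c := by
        split
        · intro x hx
          rcases List.mem_cons.mp hx with h | h
          · subst h; exact hd
          · exact hsub x h
        · exact hsub
      have := ih k q c (if st'.length < k then d :: st' else st') hk
        (by simp at hkp; omega)
        (by simpa using hc)
        (fun j x hj hx => h2 (j+1) x (by omega) (by simpa using hx))
        (fun j x hj hx => h3 (j+1) x (by simp at hj ⊢; omega) (by simpa using hx))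
        hnew
      simpa using this

-- B's whole algorithm on a suffix, Nat quota
def pvGB (t : List Char) (k : Nat) : List Char :=
  if t.length < k then [] else pvGo k [] t

theorem pvMain (s : List Char) : ∀ (k : Nat) (j : Nat),
    pvALoop s (s.length : Int) (j : Int) k
      = (pvGB (s.drop j) k).reverse.map (fun c => String.ofList [c]) := by
  intro k
  induction k with
  | zero =>
    intro j
    simp only [pvALoop, pvGB]
    rw [if_neg (Nat.not_lt_zero _), pvGo_zero]
    simp
  | succ k ih =>
    intro j
    simp only [pvALoop]
    by_cases hbr : (j : Int) ≥ (s.length : Int) - (k : Int)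
    · rw [if_pos hbr]
      unfold pvGB
      rw [if_pos (by rw [List.length_drop]; omega)]
      simp
    · rw [if_neg hbr]
      have hlen : j + k + 1 ≤ s.length := by omega
      have hb : ((s.length : Int) - (k : Int)) = ((s.length - k : Nat) : Int) := by omega
      rw [hb, PySem.List.slice_natCast]
      set w := (s.drop j).take (s.length - k - j) with hw
      have hwlen : w.length = s.length - k - j := by
        rw [hw, List.length_take, List.length_drop]; omega
      have hwne : w ≠ [] := by
        intro h0; rw [h0] at hwlen; simp at hwlen; omega
      rw [if_neg hwne]
      obtain ⟨⟨p, m⟩, hfam⟩ : ∃ pm, pvFam w = some pm := by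
        cases hf : pvFam w with
        | none => exact absurd ((pvFam_none w).mp hf) hwne
        | some pm => exact ⟨pm, rfl⟩
      rw [pvMax?_enum w (j : Int) p m hfam]
      dsimp only
      have hplt : p < w.length := pvFam_lt_length w p m hfam
      have hcast : ((j : Int) + (p : Int) + 1) = ((j + p + 1 : Nat) : Int) := by push_cast; ring
      rw [hcast, ih (j + p + 1)]
      set t := s.drop j with ht
      have htlen : t.length = s.length - j := by rw [ht, List.length_drop]
      have hwt : w = t.take (t.length - k) := by rw [hw, htlen, ht]; congr 1; omega
      obtain ⟨hwm, hw2, hw3⟩ := pvFam_spec w p m hfam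
      have hpt : p < t.length - k := by omega
      have htm : t[p]? = some m := by
        rw [hwt] at hwm; rwa [List.getElem?_take_of_lt hpt] at hwm
      have hsplit := pvGo_split t (k+1) p m [] (by omega) (by omega) htm
        (fun j' x hj' hx => hw2 j' x hj'
          (by rw [hwt, List.getElem?_take_of_lt (by omega)]; exact hx))
        (fun j' x hj' hx => hw3 j' x
          (by rw [hwt, List.getElem?_take_of_lt (by omega)]; exact hx))
        (by simp)
      have hdrop : s.drop (j + p + 1) = t.drop (p + 1) := by
        rw [ht, List.drop_drop]
        congr 1
      rw [hdrop]
      have hg1 : ¬ t.length < k + 1 := by omega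
      have hg2 : ¬ (t.drop (p + 1)).length < k := by rw [List.length_drop]; omega
      unfold pvGB
      rw [if_neg hg2, if_neg hg1, hsplit]
      simp

-- ===== VERDICT (by name: the statement is the Claim_ definition above) =====
theorem get_n_sequential_peaks_spec : Claim_equal_get_n_sequential_peaks := by
  intro s np _
  unfold Spec_get_n_sequential_peaks get_n_sequential_peaks get_n_sequential_peaks_alt
  have h := pvMain s.toList np.toNat 0
  simp only [List.drop_zero, Int.natCast_zero] at h
  rw [h]
  unfold pvGB
  by_cases hg : np > (s.toList.length : Int)
  · rw [if_pos (show s.toList.length < np.toNat by omega), if_pos hg]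
    rfl
  · rw [if_neg (show ¬ s.toList.length < np.toNat by omega), if_neg hg]
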